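-- pv_equiv track=rewrite | github.com/liambohl/fitness-ruggedness-and-phenotypic-plasticity | calc-mutant-fitness.py | permute_environments
-- ===== SOURCE A (Python) =====
-- def permute_environments(tasks_remaining, environments = None):
-- 	'''
-- 	Expand the given list of environments to include all possibilities of next task.
-- 	environments: all permutations of values for previous tasks - [[int]]
-- 	tasks_remaining: which tasks are measured in this experiment - [int]
-- 	returns: expanded list of environments - [[int]]
-- 	'''
-- 	if environments == None:
-- 		environments = [[]]
-- 	# Expand list by one task
-- 	if tasks_remaining[0] == 0: # Next task is not measured
-- 		new_environments = [env + [0] for env in environments]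
-- 	else:
-- 		new_environments = []
-- 		for env in environments:
-- 			new_environments.append(env + [1])
-- 			new_environments.append(env + [-1])
--
-- 	# Call next generation and return
-- 	if len(tasks_remaining) > 1:
-- 		return permute_environments(tasks_remaining[1:], new_environments)
-- 	else:
-- 		return new_environments
-- ===== SOURCE B (Python) =====
-- def permute_environments(tasks_remaining, environments=None):
--     if environments is None:
--         environments = [[]]
--     for t in tasks_remaining:
--         vals = [0] if t == 0 else [1, -1]
--         environments = [env + [v] for env in environments for v in vals]
--     return environments
-- ===== Notes on version B (the rewrite author's own statement) =====
-- stated objective: simpler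
-- what changed: Replaces the tail recursion on tasks_remaining[1:] (with per-task branch building new_environments via map-or-append loop) by a single iterative left fold that rebuilds the environment list with one comprehension per task.
import Mathlib
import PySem

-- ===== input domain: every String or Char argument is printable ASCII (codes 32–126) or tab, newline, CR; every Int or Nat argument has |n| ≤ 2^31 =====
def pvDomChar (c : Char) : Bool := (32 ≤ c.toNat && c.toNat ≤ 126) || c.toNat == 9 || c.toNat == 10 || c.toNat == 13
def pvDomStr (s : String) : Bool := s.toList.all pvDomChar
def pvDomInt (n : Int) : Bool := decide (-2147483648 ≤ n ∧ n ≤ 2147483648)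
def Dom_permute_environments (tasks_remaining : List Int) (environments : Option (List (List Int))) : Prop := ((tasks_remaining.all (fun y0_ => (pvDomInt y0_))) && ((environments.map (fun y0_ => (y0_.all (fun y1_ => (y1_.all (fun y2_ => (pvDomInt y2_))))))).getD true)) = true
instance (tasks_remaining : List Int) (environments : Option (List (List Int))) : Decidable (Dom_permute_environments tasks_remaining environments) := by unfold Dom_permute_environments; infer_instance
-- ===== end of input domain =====

-- B replaces A's tail recursion with a single iterative fold (one comprehension per task);
-- equivalence of RETURN values on non-empty tasks_remaining (A raises IndexError on []).

-- ===== PORT A =====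
-- Literal transliteration of A: default [[]], branch on tasks_remaining[0], explicit append
-- loop for the non-zero case, recursive call on the tail when more tasks remain.
-- On [] Python raises IndexError (tasks_remaining[0]); excluded by Pre_, port returns [].
def permute_environments (tasks_remaining : List Int) (environments : Option (List (List Int))) : List (List Int) :=
  let envs := environments.getD [[]]
  match tasks_remaining with
  | [] => []
  | t :: rest =>
    let new_environments :=
      if t = 0 then envs.map (fun env => env ++ [0])
      else envs.foldl (fun acc env => (acc ++ [env ++ [1]]) ++ [env ++ [-1]]) []
    if rest.length > 0 then permute_environments rest (some new_environments)
    else new_environments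

-- ===== PORT B =====
-- Literal transliteration of B: fold over tasks_remaining; each step is the comprehension
-- [env + [v] for env in environments for v in vals] with vals = [0] or [1, -1].
def permute_environments_alt (tasks_remaining : List Int) (environments : Option (List (List Int))) : List (List Int) :=
  tasks_remaining.foldl
    (fun envs t =>
      let vals : List Int := if t = 0 then [0] else [1, -1]
      envs.flatMap (fun env => vals.map (fun v => env ++ [v])))
    (environments.getD [[]])

-- ===== PRECONDITION & SPEC =====
-- Pre_ excludes only the empty task list, on which A raises IndexError via tasks_remaining[0].
def Pre_permute_environments (tasks_remaining : List Int) (_environments : Option (List (List Int))) : Prop :=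
  tasks_remaining ≠ []
instance (tasks_remaining : List Int) (environments : Option (List (List Int))) : Decidable (Pre_permute_environments tasks_remaining environments) := by unfold Pre_permute_environments; infer_instance
def pvWitness_permute_environments : List Int × Option (List (List Int)) := ([1, 0, 2], none)


def Spec_permute_environments (tasks_remaining : List Int) (environments : Option (List (List Int))) (out : List (List Int)) : Prop := out = permute_environments_alt tasks_remaining environments
instance (tasks_remaining : List Int) (environments : Option (List (List Int))) (out : List (List Int)) : Decidable (Spec_permute_environments tasks_remaining environments out) := by unfold Spec_permute_environments; infer_instance

-- ===== CLAIM (what is proved, stated in full; the proofs are below) =====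
def Claim_equal_permute_environments : Prop := ∀ (tasks_remaining : List Int) (environments : Option (List (List Int))), Dom_permute_environments tasks_remaining environments → Pre_permute_environments tasks_remaining environments → Spec_permute_environments tasks_remaining environments (permute_environments tasks_remaining environments)

-- ===== LEMMAS AND PROOFS =====

-- B's one step of the fold, named for the proofs.
def pvStep (envs : List (List Int)) (t : Int) : List (List Int) :=
  let vals : List Int := if t = 0 then [0] else [1, -1]
  envs.flatMap (fun env => vals.map (fun v => env ++ [v]))

-- A's per-task expansion equals B's step.
theorem stepA_eq_step (envs : List (List Int)) (t : Int) :
    (if t = 0 then envs.map (fun env => env ++ [0])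
     else envs.foldl (fun acc env => (acc ++ [env ++ [1]]) ++ [env ++ [-1]]) []) = pvStep envs t := by
  unfold pvStep
  split_ifs with h
  · induction envs with
    | nil => simp
    | cons e es ih => simp [List.flatMap] at ih ⊢; simpa using ih
  · induction envs using List.reverseRecOn with
    | nil => simp
    | append_singleton xs x ih =>
        simp only [List.foldl_append, List.foldl_cons, List.foldl_nil, ih, List.flatMap_append]
        simp

-- A on a non-empty task list is B's fold, for any optional starting environments.
theorem permA_eq_foldl (rest : List Int) :
    ∀ (t : Int) (environments : Option (List (List Int))),
      permute_environments (t :: rest) environments =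
        (t :: rest).foldl pvStep (environments.getD [[]]) := by
  induction rest with
  | nil =>
      intro t environments
      rw [permute_environments]
      simp only [List.length_nil, gt_iff_lt, lt_self_iff_false, if_false]
      rw [stepA_eq_step]
      rfl
  | cons r rs ih =>
      intro t environments
      rw [permute_environments]
      simp only [List.length_cons, Nat.succ_pos, if_pos, gt_iff_lt]
      rw [ih r, List.foldl_cons, stepA_eq_step]
      rfl

-- ===== VERDICT (by name: the statement is the Claim_ definition above) =====
theorem permute_environments_spec : Claim_equal_permute_environments := by
  intro tasks_remaining environments _ hpre
  unfold Spec_permute_environments permute_environments_alt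
  match tasks_remaining with
  | [] => exact absurd rfl hpre
  | t :: rest => exact permA_eq_foldl rest t environments
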